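-- pv_equiv track=rewrite | github.com/mariustache/aoc | day7_handy_haversacks/main.py | parse_bag_rule
-- ===== SOURCE A (Python) =====
-- def parse_bag_rule(bag_rule):
--     splited = bag_rule.split("contain ")
--     bag = splited[0].split(" ")
--     bag_name = " ".join(bag[0:2])
--
--     if "no other" in bag_rule:
--         return bag_name, dict()
--
--     children_bags = splited[-1].split(", ")
--
--     bags = dict()
--     for bag in children_bags:
--         elements = bag.split(" ")
--         quantity = elements[0]
--         color_code = " ".join(elements[1:-1])
--         bags[color_code] = int(quantity)
--
--     return bag_name, bags
-- ===== SOURCE B (Python) =====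
-- def parse_bag_rule(bag_rule):
--     head, _, tail = bag_rule.partition("contain ")
--     bag_name = " ".join(head.split(" ")[:2])
--     if "no other" in bag_rule:
--         return bag_name, {}
--     bags = {}
--     quantity, colors = None, []
--     words = tail.split(" ")
--     for word in words[:-1]:
--         done = word.endswith(",")
--         if done:
--             word = word[:-1]
--         if quantity is None:
--             quantity = word
--         else:
--             colors.append(word)
--         if done:
--             bags[" ".join(colors[:-1])] = int(quantity)
--             quantity, colors = None, []
--     word = words[-1]
--     if quantity is None:
--         quantity = word
--     else:
--         colors.append(word)
--     bags[" ".join(colors[:-1])] = int(quantity)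
--     return bag_name, bags
-- ===== Notes on version B (the rewrite author's own statement) =====
-- stated objective: alternative
-- what changed: A parses the tail in stages (split on ', ', then split every chunk on ' ' and re-join slices); B tokenizes the tail into a single word stream and runs ONE fused scan over it, maintaining quantity/colour accumulators and flushing an entry whenever a non-final word carries a trailing comma, with str.partition for the head; Pre_ excludes rules where 'contain ' does not occur exactly once (there A's splited[0]/splited[-1] reads around the first/last of missing or repeated separators and B raises or may differ) and rules whose chunk quantity makes A's int() raise ValueError.
-- outside the precondition, e.g. on parse_bag_rule('a contain b contain 1 x y bags'): A returns ('a ', {'x y': 1}), B raises ValueError; on parse_bag_rule('1 red bags'): A returns ('1 red', {'red': 1}), B raises ValueError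
import Mathlib
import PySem

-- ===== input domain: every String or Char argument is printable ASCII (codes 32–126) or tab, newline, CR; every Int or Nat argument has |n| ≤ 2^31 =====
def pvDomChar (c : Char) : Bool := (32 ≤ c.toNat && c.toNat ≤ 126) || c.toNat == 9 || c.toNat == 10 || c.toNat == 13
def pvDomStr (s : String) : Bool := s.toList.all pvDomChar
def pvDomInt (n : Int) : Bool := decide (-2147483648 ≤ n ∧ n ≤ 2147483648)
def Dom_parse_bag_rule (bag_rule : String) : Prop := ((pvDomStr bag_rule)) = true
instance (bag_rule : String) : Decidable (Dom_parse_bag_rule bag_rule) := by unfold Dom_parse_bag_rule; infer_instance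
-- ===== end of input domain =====

-- B replaces A's staged splits (split on ", ", then split each chunk on " ") by ONE fused left-to-right scan
-- over the word stream of the tail, maintaining quantity/colour accumulators and flushing at comma-marked words;
-- the head is taken with str.partition. Objective: alternative (same asymptotic cost).

-- ===== PORT A =====
-- literal transliteration of Source A (strings handled as List Char via PySem.Chars)
def parse_bag_rule (bag_rule : String) : String × (List (String × Int)) :=
  let s := bag_rule.toList
  let splited := PySem.Chars.splitOn s ("contain ".toList)
  let bag := PySem.Chars.splitOn (PySem.List.pyGetD splited 0 []) [' ']
  let bag_name := PySem.Chars.join [' '] (PySem.List.slice bag (some 0) (some 2))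
  if PySem.Chars.isIn ("no other".toList) s then
    (String.ofList bag_name, ([] : List (String × Int)))
  else
    let children_bags := PySem.Chars.splitOn (PySem.List.pyGetD splited (-1) []) (", ".toList)
    let bags := children_bags.foldl (fun (d : PySem.Dict String Int) (bagc : List Char) =>
      let elements := PySem.Chars.splitOn bagc [' ']
      let quantity := PySem.List.pyGetD elements 0 []
      let color_code := PySem.Chars.join [' '] (PySem.List.slice elements (some 1) (some (-1)))
      -- int(quantity) raises ValueError when unparsable; exactly those inputs are excluded by Pre_ (the default 0 is never reached inside Pre_)
      d.insert (String.ofList color_code) ((PySem.Int.ofChars? quantity).getD 0)) PySem.Dict.empty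
    (String.ofList bag_name, bags.items)

-- ===== PORT B =====
-- B-side helpers: the loop state is (bags, quantity : Option word, colors)
-- 'quantity is None → quantity = word, else colors.append(word)'
def pvFeedB (st : PySem.Dict String Int × Option (List Char) × List (List Char)) (w : List Char) :
    PySem.Dict String Int × Option (List Char) × List (List Char) :=
  match st with
  | (d, none, colors) => (d, some w, colors)
  | (d, some q, colors) => (d, some q, colors ++ [w])

-- 'bags[" ".join(colors[:-1])] = int(quantity)'
def pvFlushB (st : PySem.Dict String Int × Option (List Char) × List (List Char)) :
    PySem.Dict String Int :=
  match st with
  | (d, q, colors) =>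
      d.insert (String.ofList (PySem.Chars.join [' '] (PySem.List.slice colors none (some (-1)))))
        ((PySem.Int.ofChars? (q.getD [])).getD 0)

-- one iteration of B's loop over words[:-1]
def pvStepB (st : PySem.Dict String Int × Option (List Char) × List (List Char)) (word : List Char) :
    PySem.Dict String Int × Option (List Char) × List (List Char) :=
  let done := PySem.Chars.endswith word [',']
  let w := if done then PySem.List.slice word none (some (-1)) else word
  let st2 := pvFeedB st w
  if done then (pvFlushB st2, none, []) else st2

-- literal transliteration of Source B: partition for the head, then one fused scan over the tail's word stream
def parse_bag_rule_alt (bag_rule : String) : String × (List (String × Int)) :=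
  let s := bag_rule.toList
  -- head, _, tail = bag_rule.partition("contain ")
  let i := PySem.Chars.find s ("contain ".toList)
  let head := if 0 ≤ i then PySem.List.slice s none (some i) else s
  let tail := if 0 ≤ i then PySem.List.slice s (some (i + 8)) none else []
  let bag_name := PySem.Chars.join [' '] (PySem.List.slice (PySem.Chars.splitOn head [' ']) none (some 2))
  if PySem.Chars.isIn ("no other".toList) s then
    (String.ofList bag_name, ([] : List (String × Int)))
  else
    let words := PySem.Chars.splitOn tail [' ']
    let st := (PySem.List.slice words none (some (-1))).foldl pvStepB (PySem.Dict.empty, none, [])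
    let st2 := pvFeedB st (PySem.List.pyGetD words (-1) [])
    let bags := pvFlushB st2
    (String.ofList bag_name, bags.items)

-- ===== PRECONDITION & SPEC =====
-- Pre_ excludes (i) inputs on which the Python A raises ValueError (int() on a chunk's first word that is not an
-- int literal), and (ii) malformed rules in which the separator "contain " does not occur exactly once and the
-- "no other" shortcut is not taken: there A's splited[0]/splited[-1] reads text around the first/last of the
-- missing or repeated separators — an accident of split indexing on which B's parse raises or may differ.
def Pre_parse_bag_rule (bag_rule : String) : Prop :=
  PySem.Chars.isIn ("no other".toList) bag_rule.toList = true ∨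
  (0 ≤ PySem.Chars.find bag_rule.toList ("contain ".toList) ∧
   PySem.Chars.isIn ("contain ".toList)
     (bag_rule.toList.drop ((PySem.Chars.find bag_rule.toList ("contain ".toList)).toNat + 8)) = false ∧
   ∀ c ∈ PySem.Chars.splitOn
       (bag_rule.toList.drop ((PySem.Chars.find bag_rule.toList ("contain ".toList)).toNat + 8))
       (", ".toList),
     (PySem.Int.ofChars? (PySem.List.pyGetD (PySem.Chars.splitOn c [' ']) 0 [])).isSome = true)
instance (bag_rule : String) : Decidable (Pre_parse_bag_rule bag_rule) := by
  unfold Pre_parse_bag_rule; infer_instance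

def pvWitness_parse_bag_rule : String :=
  "light red bags contain 1 bright white bag, 2 muted yellow bags."

def Spec_parse_bag_rule (bag_rule : String) (out : String × (List (String × Int))) : Prop := out = parse_bag_rule_alt bag_rule
instance (bag_rule : String) (out : String × (List (String × Int))) : Decidable (Spec_parse_bag_rule bag_rule out) := by unfold Spec_parse_bag_rule; infer_instance

-- ===== CLAIM (what is proved, stated in full; the proofs are below) =====
def Claim_equal_parse_bag_rule : Prop := ∀ (bag_rule : String), Dom_parse_bag_rule bag_rule → Pre_parse_bag_rule bag_rule → Spec_parse_bag_rule bag_rule (parse_bag_rule bag_rule)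

-- ===== LEMMAS AND PROOFS =====

theorem pv_go_acc (sep : List Char) : ∀ (fuel : Nat) (l cur : List Char) (acc : List (List Char)),
    PySem.Chars.splitOn.go sep fuel l cur acc = acc.reverse ++ PySem.Chars.splitOn.go sep fuel l cur [] := by
  intro fuel
  induction fuel with
  | zero => intro l cur acc; simp [PySem.Chars.splitOn.go]
  | succ fuel ih =>
    intro l cur acc
    cases l with
    | nil => simp [PySem.Chars.splitOn.go]
    | cons c rest =>
      rw [PySem.Chars.splitOn.go, PySem.Chars.splitOn.go]
      split
      · rw [ih _ _ (cur.reverse :: acc), ih _ _ [cur.reverse]]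
        simp
      · rw [ih _ _ acc]

theorem pv_go_ne (sep : List Char) : ∀ (fuel : Nat) (l cur : List Char) (acc : List (List Char)),
    PySem.Chars.splitOn.go sep fuel l cur acc ≠ [] := by
  intro fuel
  induction fuel with
  | zero => intro l cur acc; simp [PySem.Chars.splitOn.go]
  | succ fuel ih =>
    intro l cur acc
    cases l with
    | nil => simp [PySem.Chars.splitOn.go]
    | cons c rest =>
      rw [PySem.Chars.splitOn.go]
      split
      · exact ih _ _ _
      · exact ih _ _ _

theorem pv_go_cur (sep : List Char) : ∀ (fuel : Nat) (l cur : List Char),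
    PySem.Chars.splitOn.go sep fuel l cur [] =
      (cur.reverse ++ (PySem.Chars.splitOn.go sep fuel l [] []).headI) ::
        (PySem.Chars.splitOn.go sep fuel l [] []).tail := by
  intro fuel
  induction fuel with
  | zero => intro l cur; simp [PySem.Chars.splitOn.go]
  | succ fuel ih =>
    intro l cur
    cases l with
    | nil => simp [PySem.Chars.splitOn.go]
    | cons c rest =>
      rw [PySem.Chars.splitOn.go, PySem.Chars.splitOn.go]
      split
      · rw [pv_go_acc sep fuel _ [] [cur.reverse], pv_go_acc sep fuel _ [] [List.reverse []]]
        simp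
      · rw [ih rest (c :: cur), ih rest [c]]
        simp

theorem pv_go_fuel (sep : List Char) (hsep : sep ≠ []) :
    ∀ (fuel fuel' : Nat) (l cur : List Char) (acc : List (List Char)),
    l.length < fuel → l.length < fuel' →
    PySem.Chars.splitOn.go sep fuel l cur acc = PySem.Chars.splitOn.go sep fuel' l cur acc := by
  intro fuel
  induction fuel with
  | zero => intro fuel' l cur acc h1 h2; omega
  | succ fuel ih =>
    intro fuel' l cur acc h1 h2
    cases fuel' with
    | zero => omega
    | succ fuel' =>
      cases l with
      | nil => simp [PySem.Chars.splitOn.go]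
      | cons c rest =>
        rw [PySem.Chars.splitOn.go, PySem.Chars.splitOn.go]
        have hk : 1 ≤ sep.length := by
          cases sep with
          | nil => exact absurd rfl hsep
          | cons a b => simp
        simp only [List.length_cons] at h1 h2
        split
        · apply ih <;> · rw [List.length_drop]; simp only [List.length_cons]; omega
        · apply ih <;> omega

theorem pv_splitOn_ne (sep l : List Char) : PySem.Chars.splitOn l sep ≠ [] :=
  pv_go_ne sep _ l [] []

theorem pv_splitOn_eq (sep : List Char) (hsep : sep ≠ []) (l : List Char) :
    PySem.Chars.splitOn l sep =
      if sep.isPrefixOf l then [] :: PySem.Chars.splitOn (l.drop sep.length) sep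
      else match l with
        | [] => [[]]
        | c :: rest => (c :: (PySem.Chars.splitOn rest sep).headI) :: (PySem.Chars.splitOn rest sep).tail := by
  have hk : 1 ≤ sep.length := by
    cases sep with
    | nil => exact absurd rfl hsep
    | cons a b => simp
  cases l with
  | nil =>
    have : ¬ sep.isPrefixOf ([] : List Char) := by
      cases sep with
      | nil => exact absurd rfl hsep
      | cons a b => simp [List.isPrefixOf]
    simp [PySem.Chars.splitOn, PySem.Chars.splitOn.go, this]
  | cons c rest =>
    show PySem.Chars.splitOn.go sep ((c :: rest).length + 1) (c :: rest) [] [] = _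
    have hlen : (c :: rest).length + 1 = (rest.length + 1) + 1 := by simp
    rw [hlen, PySem.Chars.splitOn.go]
    split
    · rename_i hpre
      rw [pv_go_acc sep _ _ [] [List.reverse []]]
      simp only [List.reverse_nil]
      have : PySem.Chars.splitOn.go sep (rest.length + 1) (List.drop sep.length (c :: rest)) [] [] =
          PySem.Chars.splitOn (List.drop sep.length (c :: rest)) sep := by
        apply pv_go_fuel sep hsep
        · simp; omega
        · simp
      rw [this]
      simp
    · rename_i hpre
      rw [pv_go_cur sep _ rest [c]]
      simp [PySem.Chars.splitOn]

theorem pv_prefix_drop_infix {sep l : List Char} {n : Nat} (h : sep <+: l.drop n) : sep <:+: l :=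
  (h.isInfix).trans (List.drop_suffix n l).isInfix

theorem pv_find_eq_of (l sep : List Char) (n : Nat) (h1 : sep <+: l.drop n)
    (h2 : ∀ i, i < n → ¬ sep <+: l.drop i) : PySem.Chars.find l sep = n := by
  have hnn : 0 ≤ PySem.Chars.find l sep :=
    (PySem.Chars.find_nonneg_iff l sep).mpr (pv_prefix_drop_infix h1)
  obtain ⟨hpre, hmin⟩ := PySem.Chars.find_spec hnn
  rcases Nat.lt_trichotomy (PySem.Chars.find l sep).toNat n with h | h | h
  · exact absurd hpre (h2 _ h)
  · omega
  · exact absurd h1 (hmin n h)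

theorem pv_find_prefix (l sep : List Char) (h : sep <+: l) : PySem.Chars.find l sep = 0 :=
  pv_find_eq_of l sep 0 (by simpa using h) (by omega)

theorem pv_infix_cons_elim (sep rest : List Char) (c : Char) (h : sep <:+: (c :: rest))
    (hp : ¬ sep <+: (c :: rest)) : sep <:+: rest := by
  obtain ⟨j, hj⟩ := (PySem.Chars.exists_prefix_drop_iff_isIn sep (c :: rest)).mpr
    ((PySem.Chars.isIn_iff_infix sep (c :: rest)).mpr h)
  cases j with
  | zero => exact absurd (by simpa using hj) hp
  | succ j =>
    rw [List.drop_succ_cons] at hj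
    exact (hj.isInfix).trans (List.drop_suffix j rest).isInfix

theorem pv_find_cons (sep rest : List Char) (c : Char) (hp : ¬ sep <+: (c :: rest))
    (h : sep <:+: rest) : PySem.Chars.find (c :: rest) sep = PySem.Chars.find rest sep + 1 := by
  have hnn : 0 ≤ PySem.Chars.find rest sep := (PySem.Chars.find_nonneg_iff rest sep).mpr h
  obtain ⟨hpre, hmin⟩ := PySem.Chars.find_spec hnn
  have he : PySem.Chars.find (c :: rest) sep = ((PySem.Chars.find rest sep).toNat + 1 : Nat) := by
    apply pv_find_eq_of
    · rw [List.drop_succ_cons]; exact hpre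
    · intro i hi
      cases i with
      | zero => simpa using hp
      | succ j => rw [List.drop_succ_cons]; exact hmin j (by omega)
  rw [he]; omega

-- small helpers
theorem pv_cons_headI_tail {α : Type} [Inhabited α] (xs : List α) (h : xs ≠ []) :
    xs.headI :: xs.tail = xs := by
  cases xs with
  | nil => exact absurd rfl h
  | cons a t => simp

theorem pv_dropLast_cons {α : Type} (x : α) (xs : List α) (h : xs ≠ []) :
    (x :: xs).dropLast = x :: xs.dropLast := by
  cases xs with
  | nil => exact absurd rfl h
  | cons a t => simp

theorem pv_prefix_isPrefixOf {sep l : List Char} (h : sep <+: l) : sep.isPrefixOf l = true :=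
  List.isPrefixOf_iff_prefix.mpr h

theorem pv_not_prefix_isPrefixOf {sep l : List Char} (h : ¬ sep <+: l) : ¬ (sep.isPrefixOf l = true) := by
  rw [List.isPrefixOf_iff_prefix]; exact h

-- splitOn of a string not containing sep
theorem pv_splitOn_single (sep : List Char) (hsep : sep ≠ []) :
    ∀ l : List Char, ¬ sep <:+: l → PySem.Chars.splitOn l sep = [l] := by
  have key : ∀ (n : Nat) (l : List Char), l.length ≤ n → ¬ sep <:+: l →
      PySem.Chars.splitOn l sep = [l] := by
    intro n
    induction n with
    | zero =>
      intro l hl h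
      have hl0 : l = [] := by
        cases l with
        | nil => rfl
        | cons a t => exact absurd hl (by simp)
      subst hl0
      have hp : ¬ sep <+: ([] : List Char) := fun hp => h hp.isInfix
      rw [pv_splitOn_eq sep hsep, if_neg (pv_not_prefix_isPrefixOf hp)]
    | succ n ih =>
      intro l hl h
      cases l with
      | nil =>
        have hp : ¬ sep <+: ([] : List Char) := fun hp => h hp.isInfix
        rw [pv_splitOn_eq sep hsep, if_neg (pv_not_prefix_isPrefixOf hp)]
      | cons c rest =>
        have hp : ¬ sep <+: (c :: rest) := fun hp => h hp.isInfix
        have hr : ¬ sep <:+: rest := fun hr => h (hr.trans (List.suffix_cons c rest).isInfix)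
        rw [pv_splitOn_eq sep hsep, if_neg (pv_not_prefix_isPrefixOf hp)]
        simp only [ih rest (by simpa using Nat.lt_succ_iff.mp (by simpa using hl)) hr]
        simp
  exact fun l => key l.length l le_rfl

theorem pv_splitOn_head (sep : List Char) (hsep : sep ≠ []) :
    ∀ l : List Char, sep <:+: l →
      (PySem.Chars.splitOn l sep).headI = l.take (PySem.Chars.find l sep).toNat := by
  have key : ∀ (n : Nat) (l : List Char), l.length ≤ n → sep <:+: l →
      (PySem.Chars.splitOn l sep).headI = l.take (PySem.Chars.find l sep).toNat := by
    intro n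
    induction n with
    | zero =>
      intro l hl h
      have hl0 : l = [] := by
        cases l with
        | nil => rfl
        | cons a t => exact absurd hl (by simp)
      subst hl0
      rw [List.infix_nil] at h
      exact absurd h hsep
    | succ n ih =>
      intro l hl h
      cases l with
      | nil =>
        rw [List.infix_nil] at h
        exact absurd h hsep
      | cons c rest =>
        by_cases hp : sep <+: (c :: rest)
        · rw [pv_splitOn_eq sep hsep, if_pos (pv_prefix_isPrefixOf hp)]
          simp [pv_find_prefix _ _ hp]
        · have hr : sep <:+: rest := pv_infix_cons_elim sep rest c h hp
          have hnn : 0 ≤ PySem.Chars.find rest sep := (PySem.Chars.find_nonneg_iff rest sep).mpr hr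
          rw [pv_splitOn_eq sep hsep, if_neg (pv_not_prefix_isPrefixOf hp)]
          simp only [List.headI_cons]
          rw [ih rest (by simpa using hl) hr, pv_find_cons sep rest c hp hr]
          have ht : (PySem.Chars.find rest sep + 1).toNat = (PySem.Chars.find rest sep).toNat + 1 := by omega
          rw [ht, List.take_succ_cons]
  exact fun l => key l.length l le_rfl

theorem pv_splitOn_tail (sep : List Char) (hsep : sep ≠ []) :
    ∀ l : List Char, sep <:+: l →
      PySem.Chars.splitOn (l.drop ((PySem.Chars.find l sep).toNat + sep.length)) sep =
        (PySem.Chars.splitOn l sep).tail := by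
  have key : ∀ (n : Nat) (l : List Char), l.length ≤ n → sep <:+: l →
      PySem.Chars.splitOn (l.drop ((PySem.Chars.find l sep).toNat + sep.length)) sep =
        (PySem.Chars.splitOn l sep).tail := by
    intro n
    induction n with
    | zero =>
      intro l hl h
      have hl0 : l = [] := by
        cases l with
        | nil => rfl
        | cons a t => exact absurd hl (by simp)
      subst hl0
      rw [List.infix_nil] at h
      exact absurd h hsep
    | succ n ih =>
      intro l hl h
      cases l with
      | nil =>
        rw [List.infix_nil] at h
        exact absurd h hsep
      | cons c rest =>
        by_cases hp : sep <+: (c :: rest)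
        · rw [pv_splitOn_eq sep hsep (c :: rest), if_pos (pv_prefix_isPrefixOf hp)]
          simp [pv_find_prefix _ _ hp]
        · have hr : sep <:+: rest := pv_infix_cons_elim sep rest c h hp
          have hnn : 0 ≤ PySem.Chars.find rest sep := (PySem.Chars.find_nonneg_iff rest sep).mpr hr
          rw [pv_splitOn_eq sep hsep (c :: rest), if_neg (pv_not_prefix_isPrefixOf hp)]
          rw [pv_find_cons sep rest c hp hr]
          have ht : (PySem.Chars.find rest sep + 1).toNat + sep.length
              = ((PySem.Chars.find rest sep).toNat + sep.length) + 1 := by omega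
          rw [ht, List.drop_succ_cons, ih rest (by simpa using hl) hr]
          simp
  exact fun l => key l.length l le_rfl

theorem pv_pyGetD_zero {α : Type} (xs : List α) (d : α) :
    PySem.List.pyGetD xs 0 d = xs.headD d := by
  cases xs <;> simp [PySem.List.pyGetD, PySem.List.pyGet?, PySem.List.pyIdx?]

theorem pv_pyGetD_neg_one {α : Type} (xs : List α) (d : α) :
    PySem.List.pyGetD xs (-1) d = (xs.getLast?).getD d := by
  cases hx : xs with
  | nil => simp [PySem.List.pyGetD, PySem.List.pyGet?, PySem.List.pyIdx?]
  | cons a t =>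
    rw [List.getLast?_eq_getElem?]
    simp [PySem.List.pyGetD, PySem.List.pyGet?, PySem.List.pyIdx?]

theorem pv_slice_one_neg_one {α : Type} (xs : List α) :
    PySem.List.slice xs (some 1) (some (-1)) = xs.tail.dropLast := by
  cases xs with
  | nil => simp [PySem.List.slice, PySem.List.clampIdx]
  | cons a t =>
    simp only [PySem.List.slice, PySem.List.clampIdx]
    norm_num
    rw [List.dropLast_eq_take]
    congr 1

theorem pv_slice_zero {α : Type} (xs : List α) (b : Option Int) :
    PySem.List.slice xs (some 0) b = PySem.List.slice xs none b := by
  simp [PySem.List.slice, PySem.List.clampIdx]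

theorem pv_headD_of_ne {α : Type} [Inhabited α] (xs : List α) (d : α) (h : xs ≠ []) :
    xs.headD d = xs.headI := by
  cases xs with
  | nil => exact absurd rfl h
  | cons a t => rfl

-- A's splited[0] equals B's partition head
theorem pv_head_eq (s sep : List Char) (hsep : sep ≠ []) :
    PySem.List.pyGetD (PySem.Chars.splitOn s sep) 0 [] =
      (if 0 ≤ PySem.Chars.find s sep then PySem.List.slice s none (some (PySem.Chars.find s sep)) else s) := by
  rw [pv_pyGetD_zero, pv_headD_of_ne _ _ (pv_splitOn_ne sep s)]
  by_cases hin : sep <:+: s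
  · have hnn : 0 ≤ PySem.Chars.find s sep := (PySem.Chars.find_nonneg_iff s sep).mpr hin
    rw [if_pos hnn, PySem.List.slice_to s hnn, pv_splitOn_head sep hsep s hin]
  · have hneg : PySem.Chars.find s sep = -1 := (PySem.Chars.find_eq_neg_one_iff s sep).mpr hin
    rw [pv_splitOn_single sep hsep s hin, hneg]
    norm_num

-- A's splited[-1], when sep occurs exactly once, is the text after that occurrence
theorem pv_tail_eq_unique (s sep : List Char) (hsep : sep ≠ [])
    (hf : 0 ≤ PySem.Chars.find s sep)
    (hu : ¬ sep <:+: s.drop ((PySem.Chars.find s sep).toNat + sep.length)) :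
    PySem.List.pyGetD (PySem.Chars.splitOn s sep) (-1) [] =
      s.drop ((PySem.Chars.find s sep).toNat + sep.length) := by
  have hin : sep <:+: s := (PySem.Chars.find_nonneg_iff s sep).mp hf
  have h1 : (PySem.Chars.splitOn s sep).tail = [s.drop ((PySem.Chars.find s sep).toNat + sep.length)] := by
    rw [← pv_splitOn_tail sep hsep s hin, pv_splitOn_single sep hsep _ hu]
  rw [pv_pyGetD_neg_one, ← pv_cons_headI_tail (PySem.Chars.splitOn s sep) (pv_splitOn_ne sep s), h1]
  simp

-- ----- proof-layer view of B's scan -----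

-- append ',' to the last word of a word group (how a chunk's words appear in the fused stream)
def pvMarkLast : List (List Char) → List (List Char)
  | [] => []
  | [w] => [w ++ [',']]
  | w :: w2 :: ws => w :: pvMarkLast (w2 :: ws)

-- the word stream of a chunk list: chunks' word groups concatenated, comma-marking every non-final group
def pvGlue : List (List Char) → List (List Char)
  | [] => []
  | [c] => PySem.Chars.splitOn c [' ']
  | c :: c2 :: rest => pvMarkLast (PySem.Chars.splitOn c [' ']) ++ pvGlue (c2 :: rest)

-- what A does with one chunk's word group
def pvFlushChunk (d : PySem.Dict String Int) (g : List (List Char)) : PySem.Dict String Int :=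
  d.insert (String.ofList (PySem.Chars.join [' '] g.tail.dropLast))
    ((PySem.Int.ofChars? g.headI).getD 0)

theorem pv_markLast_cons (w : List Char) (ws : List (List Char)) (h : ws ≠ []) :
    pvMarkLast (w :: ws) = w :: pvMarkLast ws := by
  cases ws with
  | nil => exact absurd rfl h
  | cons a t => rfl

theorem pv_markLast_append_singleton (l : List (List Char)) (w : List Char) :
    pvMarkLast (l ++ [w]) = l ++ [w ++ [',']] := by
  induction l with
  | nil => rfl
  | cons a t ih =>
    rw [List.cons_append, pv_markLast_cons _ _ (by simp), ih, List.cons_append]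

theorem pv_markLast_ne (g : List (List Char)) (h : g ≠ []) : pvMarkLast g ≠ [] := by
  cases g with
  | nil => exact absurd rfl h
  | cons a t => cases t <;> simp [pvMarkLast]

theorem pv_glue_ne (c : List Char) (tl : List (List Char)) : pvGlue (c :: tl) ≠ [] := by
  cases tl with
  | nil => exact pv_splitOn_ne [' '] c
  | cons c2 rest =>
    simp only [pvGlue]
    intro h
    rcases List.append_eq_nil_iff.mp h with ⟨h1, _⟩
    exact pv_markLast_ne _ (pv_splitOn_ne [' '] c) h1

theorem pv_glue_cons_cons (c c2 : List Char) (rest : List (List Char)) :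
    pvGlue (c :: c2 :: rest) = pvMarkLast (PySem.Chars.splitOn c [' ']) ++ pvGlue (c2 :: rest) := rfl


theorem pv_splitOn_space_cons_sp (h : List Char) :
    PySem.Chars.splitOn (' ' :: h) [' '] = [] :: PySem.Chars.splitOn h [' '] := by
  rw [pv_splitOn_eq [' '] (by decide), if_pos (by simp [List.isPrefixOf])]
  rfl

theorem pv_splitOn_space_cons_ch (c : Char) (hc : c ≠ ' ') (h : List Char) :
    PySem.Chars.splitOn (c :: h) [' '] =
      (c :: (PySem.Chars.splitOn h [' ']).headI) :: (PySem.Chars.splitOn h [' ']).tail := by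
  rw [pv_splitOn_eq [' '] (by decide), if_neg]
  simp [List.isPrefixOf]
  exact fun he => hc he.symm

theorem pv_glue_cons_sp (h : List Char) (tl : List (List Char)) :
    pvGlue ((' ' :: h) :: tl) = [] :: pvGlue (h :: tl) := by
  cases tl with
  | nil => exact pv_splitOn_space_cons_sp h
  | cons c2 rest =>
    rw [pv_glue_cons_cons, pv_glue_cons_cons, pv_splitOn_space_cons_sp,
      pv_markLast_cons _ _ (pv_splitOn_ne [' '] h), List.cons_append]

theorem pv_glue_cons_ch (c : Char) (hc : c ≠ ' ') (h : List Char) (tl : List (List Char)) :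
    pvGlue ((c :: h) :: tl) =
      (c :: (pvGlue (h :: tl)).headI) :: (pvGlue (h :: tl)).tail := by
  have hS := pv_splitOn_space_cons_ch c hc h
  cases tl with
  | nil => exact hS
  | cons c2 rest =>
    rw [pv_glue_cons_cons, pv_glue_cons_cons, hS]
    cases hE : PySem.Chars.splitOn h [' '] with
    | nil => exact absurd hE (pv_splitOn_ne [' '] h)
    | cons s0 srest =>
      cases srest with
      | nil => simp [pvMarkLast]
      | cons w2 ws => simp [pvMarkLast, pv_markLast_cons]

-- the word stream of the tail IS the chunk structure, flattened with comma marks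
theorem pv_glue_splitOn : ∀ t : List Char,
    PySem.Chars.splitOn t [' '] = pvGlue (PySem.Chars.splitOn t [',', ' ']) := by
  have key : ∀ (n : Nat) (t : List Char), t.length ≤ n →
      PySem.Chars.splitOn t [' '] = pvGlue (PySem.Chars.splitOn t [',', ' ']) := by
    intro n
    induction n with
    | zero =>
      intro t hl
      have ht : t = [] := by
        cases t with
        | nil => rfl
        | cons a b => exact absurd hl (by simp)
      subst ht
      decide
    | succ n ih =>
      intro t hl
      cases t with
      | nil => decide
      | cons c rest =>
        by_cases hp2 : [',', ' '] <+: (c :: rest)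
        · obtain ⟨u, hu⟩ := hp2
          rw [List.cons_append] at hu
          obtain ⟨hc, hrest⟩ := List.cons_eq_cons.mp hu.symm
          subst hc
          rw [List.cons_append, List.nil_append] at hrest
          subst hrest
          rw [pv_splitOn_eq [',', ' '] (by decide),
            if_pos (show ([',', ' '] : List Char).isPrefixOf (',' :: ' ' :: u) = true by
              simp [List.isPrefixOf])]
          have hdrop : List.drop ([',', ' '] : List Char).length (',' :: ' ' :: u) = u := rfl
          rw [hdrop]
          rw [pv_splitOn_space_cons_ch ',' (by decide) (' ' :: u), pv_splitOn_space_cons_sp u]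
          have hih := ih u (by simp at hl; omega)
          cases hT : PySem.Chars.splitOn u [',', ' '] with
          | nil => exact absurd hT (pv_splitOn_ne [',', ' '] u)
          | cons h' tl' =>
            rw [hT] at hih
            rw [pv_glue_cons_cons]
            simp only [List.headI_cons, List.tail_cons]
            rw [hih]
            rfl
        · rw [pv_splitOn_eq [',', ' '] (by decide) (c :: rest),
            if_neg (pv_not_prefix_isPrefixOf hp2)]
          have hih := ih rest (by simpa using hl)
          have hTne := pv_splitOn_ne [',', ' '] rest
          by_cases hcsp : c = ' '
          · subst hcsp
            rw [pv_splitOn_space_cons_sp rest, pv_glue_cons_sp,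
              pv_cons_headI_tail _ hTne, hih]
          · rw [pv_splitOn_space_cons_ch c hcsp rest, pv_glue_cons_ch c hcsp,
              pv_cons_headI_tail _ hTne, hih]
  exact fun t => key t.length t le_rfl



theorem pv_endswith_concat (w : List Char) : PySem.Chars.endswith (w ++ [',']) [','] = true := by
  rw [PySem.Chars.endswith_iff]; exact List.suffix_append w [',']

theorem pv_step_clean (st : PySem.Dict String Int × Option (List Char) × List (List Char))
    (w : List Char) (h : PySem.Chars.endswith w [','] = false) :
    pvStepB st w = pvFeedB st w := by
  simp [pvStepB, h]

theorem pv_step_marked (st : PySem.Dict String Int × Option (List Char) × List (List Char))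
    (w : List Char) :
    pvStepB st (w ++ [',']) = (pvFlushB (pvFeedB st w), none, []) := by
  simp [pvStepB, pv_endswith_concat, PySem.List.slice_to_neg_one]

theorem pv_feed_some (ws : List (List Char)) :
    ∀ (d : PySem.Dict String Int) (q : List Char) (cs : List (List Char)),
    (∀ w ∈ ws, PySem.Chars.endswith w [','] = false) →
    ws.foldl pvStepB (d, some q, cs) = (d, some q, cs ++ ws) := by
  induction ws with
  | nil => intro d q cs h; simp
  | cons w ws ih =>
    intro d q cs h
    rw [List.foldl_cons, pv_step_clean _ _ (h w (by simp))]
    have hfeed : pvFeedB (d, some q, cs) w = (d, some q, cs ++ [w]) := rfl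
    rw [hfeed, ih d q (cs ++ [w]) (fun w' hw' => h w' (by simp [hw'])), List.append_assoc]
    rfl

theorem pv_flushB_some (d : PySem.Dict String Int) (q : List Char) (colors : List (List Char)) :
    pvFlushB (d, some q, colors) =
      d.insert (String.ofList (PySem.Chars.join [' '] colors.dropLast))
        ((PySem.Int.ofChars? q).getD 0) := by
  simp [pvFlushB, PySem.List.slice_to_neg_one]

theorem pv_markLast_fold (g : List (List Char)) (hg : g ≠ [])
    (hcl : ∀ w ∈ g.dropLast, PySem.Chars.endswith w [','] = false) (d : PySem.Dict String Int) :
    (pvMarkLast g).foldl pvStepB (d, none, []) = (pvFlushChunk d g, none, []) := by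
  obtain ⟨l, w, rfl⟩ : ∃ l w, g = l ++ [w] :=
    ⟨g.dropLast, g.getLast hg, (List.dropLast_concat_getLast hg).symm⟩
  rw [pv_markLast_append_singleton]
  have hcl' : ∀ w' ∈ l, PySem.Chars.endswith w' [','] = false := by
    intro w' hw'; exact hcl w' (by simpa using hw')
  cases l with
  | nil =>
    rw [List.nil_append, List.foldl_cons, List.foldl_nil, pv_step_marked]
    have hfeed : pvFeedB (d, none, ([] : List (List Char))) w = (d, some w, []) := rfl
    rw [hfeed, pv_flushB_some]
    rfl
  | cons w0 l' =>
    rw [List.cons_append, List.foldl_cons,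
      pv_step_clean _ _ (hcl' w0 (by simp))]
    have hfeed : pvFeedB (d, none, ([] : List (List Char))) w0 = (d, some w0, []) := rfl
    rw [hfeed, List.foldl_append, pv_feed_some l' d w0 [] (fun w' hw' => hcl' w' (by simp [hw'])),
      List.nil_append, List.foldl_cons, List.foldl_nil, pv_step_marked]
    have hfeed2 : pvFeedB (d, some w0, l') w = (d, some w0, l' ++ [w]) := rfl
    rw [hfeed2, pv_flushB_some, List.dropLast_concat]
    simp [pvFlushChunk]

-- B's scan over one chunk's word group (ending the stream) is A's treatment of that chunk
theorem pv_scan_single (g : List (List Char)) (hg : g ≠ [])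
    (hcl : ∀ w ∈ g.dropLast, PySem.Chars.endswith w [','] = false) (d : PySem.Dict String Int) :
    pvFlushB (pvFeedB ((g.dropLast).foldl pvStepB (d, none, [])) ((g.getLast?).getD [])) =
      pvFlushChunk d g := by
  obtain ⟨l, w, rfl⟩ : ∃ l w, g = l ++ [w] :=
    ⟨g.dropLast, g.getLast hg, (List.dropLast_concat_getLast hg).symm⟩
  rw [List.dropLast_concat, List.getLast?_append_of_ne_nil _ (by simp)]
  have hlast : (([w] : List (List Char)).getLast?).getD [] = w := rfl
  rw [hlast]
  have hcl' : ∀ w' ∈ l, PySem.Chars.endswith w' [','] = false := by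
    intro w' hw'; exact hcl w' (by simp [hw'])
  cases l with
  | nil =>
    rw [List.foldl_nil]
    have hfeed : pvFeedB (d, none, ([] : List (List Char))) w = (d, some w, []) := rfl
    rw [hfeed, pv_flushB_some]
    rfl
  | cons w0 l' =>
    rw [List.foldl_cons, pv_step_clean _ _ (hcl' w0 (by simp))]
    have hfeed : pvFeedB (d, none, ([] : List (List Char))) w0 = (d, some w0, []) := rfl
    rw [hfeed, pv_feed_some l' d w0 [] (fun w' hw' => hcl' w' (by simp [hw'])), List.nil_append]
    have hfeed2 : pvFeedB (d, some w0, l') w = (d, some w0, l' ++ [w]) := rfl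
    rw [hfeed2, pv_flushB_some, List.dropLast_concat]
    simp [pvFlushChunk]

-- B's whole scan over the fused word stream equals A's chunk-by-chunk fold
theorem pv_scan (chunks : List (List Char)) (hne : chunks ≠ [])
    (hcl : ∀ c ∈ chunks, ∀ w ∈ (PySem.Chars.splitOn c [' ']).dropLast,
      PySem.Chars.endswith w [','] = false) :
    ∀ d : PySem.Dict String Int,
    pvFlushB (pvFeedB (((pvGlue chunks).dropLast).foldl pvStepB (d, none, []))
        (((pvGlue chunks).getLast?).getD [])) =
      chunks.foldl (fun d c => pvFlushChunk d (PySem.Chars.splitOn c [' '])) d := by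
  induction chunks with
  | nil => exact absurd rfl hne
  | cons c tl ih =>
    intro d
    cases tl with
    | nil =>
      show pvFlushB (pvFeedB (((PySem.Chars.splitOn c [' ']).dropLast).foldl pvStepB (d, none, []))
          (((PySem.Chars.splitOn c [' ']).getLast?).getD [])) = _
      rw [List.foldl_cons, List.foldl_nil]
      exact pv_scan_single (PySem.Chars.splitOn c [' ']) (pv_splitOn_ne [' '] c)
        (hcl c (by simp)) d
    | cons c2 rest =>
      rw [pv_glue_cons_cons,
        List.dropLast_append_of_ne_nil (pv_glue_ne c2 rest),
        List.foldl_append,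
        pv_markLast_fold (PySem.Chars.splitOn c [' ']) (pv_splitOn_ne [' '] c)
          (hcl c (by simp)) d,
        List.getLast?_append_of_ne_nil _ (pv_glue_ne c2 rest),
        List.foldl_cons]
      exact ih (by simp) (fun c' hc' => hcl c' (by simp [hc'])) (pvFlushChunk d (PySem.Chars.splitOn c [' ']))



-- chunks produced by split(", ") do not contain ", "
theorem pv_chunks_no_sep : ∀ t : List Char, ∀ c ∈ PySem.Chars.splitOn t [',', ' '],
    ¬ [',', ' '] <:+: c := by
  have key : ∀ (n : Nat) (t : List Char), t.length ≤ n → ∀ c ∈ PySem.Chars.splitOn t [',', ' '],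
      ¬ [',', ' '] <:+: c := by
    intro n
    induction n with
    | zero =>
      intro t hl c hc
      have ht : t = [] := by
        cases t with
        | nil => rfl
        | cons a b => exact absurd hl (by simp)
      subst ht
      have h0 : PySem.Chars.splitOn ([] : List Char) [',', ' '] = [[]] := by decide
      rw [h0] at hc
      simp at hc
      subst hc
      intro h
      rw [List.infix_nil] at h
      exact absurd h (by decide)
    | succ n ih =>
      intro t hl c hc
      cases t with
      | nil =>
        have h0 : PySem.Chars.splitOn ([] : List Char) [',', ' '] = [[]] := by decide
        rw [h0] at hc
        simp at hc
        subst hc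
        intro h
        rw [List.infix_nil] at h
        exact absurd h (by decide)
      | cons c0 r =>
        by_cases hp : [',', ' '] <+: (c0 :: r)
        · rw [pv_splitOn_eq [',', ' '] (by decide), if_pos (pv_prefix_isPrefixOf hp)] at hc
          rcases List.mem_cons.mp hc with rfl | hmem
          · intro h
            rw [List.infix_nil] at h
            exact absurd h (by decide)
          · exact ih (List.drop ([',', ' '] : List Char).length (c0 :: r))
              (by simp at hl ⊢; omega) c hmem
        · rw [pv_splitOn_eq [',', ' '] (by decide), if_neg (pv_not_prefix_isPrefixOf hp)] at hc
          have hT := pv_splitOn_ne [',', ' '] r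
          rcases List.mem_cons.mp hc with rfl | hmem
          · intro hinf
            have hnp : ¬ [',', ' '] <+: (c0 :: (PySem.Chars.splitOn r [',', ' ']).headI) := by
              intro hpre
              apply hp
              obtain ⟨v, hv⟩ := hpre
              rw [List.cons_append] at hv
              obtain ⟨hc0, hhd⟩ := List.cons_eq_cons.mp hv
              subst hc0
              rw [List.cons_append, List.nil_append] at hhd
              have hspr : [' '] <+: r := by
                by_cases hin : [',', ' '] <:+: r
                · have hh := pv_splitOn_head [',', ' '] (by decide) r hin
                  rw [hh] at hhd
                  exact List.IsPrefix.trans ⟨v, by rw [← hhd]; rfl⟩ (List.take_prefix _ r)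
                · rw [pv_splitOn_single [',', ' '] (by decide) r hin] at hhd
                  simp only [List.headI] at hhd
                  exact ⟨v, hhd⟩
              obtain ⟨r2, hr2⟩ := hspr
              exact ⟨r2, by rw [← hr2]; rfl⟩
            have hmem' := pv_infix_cons_elim _ _ _ hinf hnp
            have hhm : (PySem.Chars.splitOn r [',', ' ']).headI ∈ PySem.Chars.splitOn r [',', ' '] := by
              cases hE : PySem.Chars.splitOn r [',', ' '] with
              | nil => exact absurd hE hT
              | cons a t => simp
            exact ih r (by simpa using hl) (PySem.Chars.splitOn r [',', ' ']).headI hhm hmem'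
          · by_cases hin : [',', ' '] <:+: r
            · rw [← pv_splitOn_tail [',', ' '] (by decide) r hin] at hmem
              exact ih _ (by simp at hl ⊢; omega) c hmem
            · rw [pv_splitOn_single [',', ' '] (by decide) r hin] at hmem
              simp at hmem
  exact fun t => key t.length t le_rfl

-- inside a chunk free of ", ", no word other than the last ends with ','
theorem pv_clean : ∀ c : List Char, ¬ [',', ' '] <:+: c →
    ∀ w ∈ (PySem.Chars.splitOn c [' ']).dropLast, PySem.Chars.endswith w [','] = false := by
  have key : ∀ (n : Nat) (c : List Char), c.length ≤ n → ¬ [',', ' '] <:+: c →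
      ∀ w ∈ (PySem.Chars.splitOn c [' ']).dropLast, PySem.Chars.endswith w [','] = false := by
    intro n
    induction n with
    | zero =>
      intro c hl h w hw
      have hc : c = [] := by
        cases c with
        | nil => rfl
        | cons a b => exact absurd hl (by simp)
      subst hc
      have h0 : (PySem.Chars.splitOn ([] : List Char) [' ']).dropLast = [] := by decide
      rw [h0] at hw
      simp at hw
    | succ n ih =>
      intro c hl h w hw
      cases c with
      | nil =>
        have h0 : (PySem.Chars.splitOn ([] : List Char) [' ']).dropLast = [] := by decide
        rw [h0] at hw
        simp at hw
      | cons ch r =>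
        have hrinf : ∀ u : List Char, u <:+: r → u <:+: (ch :: r) := fun u hu =>
          hu.trans (List.suffix_cons ch r).isInfix
        by_cases hch : ch = ' '
        · subst hch
          rw [pv_splitOn_space_cons_sp r,
            pv_dropLast_cons _ _ (pv_splitOn_ne [' '] r)] at hw
          rcases List.mem_cons.mp hw with rfl | hmem
          · decide
          · exact ih r (by simpa using hl) (fun hr => h (hrinf _ hr)) w hmem
        · rw [pv_splitOn_space_cons_ch ch hch r] at hw
          cases hTl : (PySem.Chars.splitOn r [' ']).tail with
          | nil =>
            rw [hTl] at hw
            simp at hw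
          | cons t0 ts =>
            have hin : [' '] <:+: r := by
              by_contra hnin
              rw [pv_splitOn_single [' '] (by decide) r hnin] at hTl
              simp at hTl
            have hf : 0 ≤ PySem.Chars.find r [' '] := (PySem.Chars.find_nonneg_iff r [' ']).mpr hin
            obtain ⟨hpre, _⟩ := PySem.Chars.find_spec hf
            set f := (PySem.Chars.find r [' ']).toNat with hfdef
            have hflt : f < r.length := by
              by_contra hge
              rw [List.drop_eq_nil_of_le (by omega)] at hpre
              exact absurd (List.prefix_nil.mp hpre) (by decide)
            rw [hTl, pv_dropLast_cons _ _ (by simp)] at hw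
            rcases List.mem_cons.mp hw with rfl | hmem
            · -- the head word cannot end with ','
              by_contra hend
              rw [Bool.not_eq_false, PySem.Chars.endswith_iff] at hend
              rw [pv_splitOn_head [' '] (by decide) r hin] at hend
              obtain ⟨p, hp⟩ := hend
              rw [← hfdef] at hp
              cases hfc : f with
              | zero =>
                rw [hfc] at hp
                simp only [List.take_zero] at hp
                have hch2 : ',' = ch := by
                  have h1 : (p ++ [',']).getLast? = some ',' := by simp
                  rw [hp] at h1
                  simpa using h1.symm
                have hr' : [' '] <+: r := by
                  rw [hfc] at hpre
                  simpa using hpre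
                obtain ⟨r2, hr2⟩ := hr'
                subst hch2

                apply h
                apply List.IsPrefix.isInfix
                exact ⟨r2, by rw [← hr2]; rfl⟩
              | succ m =>
                have hmlt : m < r.length := by omega
                rw [hfc, List.take_succ_eq_append_getElem hmlt] at hp
                have hlast : r[m] = ',' := by
                  have h1 : (p ++ [',']).getLast? = some ',' := by simp
                  have h2 : ((ch :: (List.take m r ++ [r[m]]))).getLast? = some r[m] := by
                    rw [show (ch :: (List.take m r ++ [r[m]])) = (ch :: List.take m r) ++ [r[m]] by simp,
                      List.getLast?_append_of_ne_nil _ (by simp)]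
                    simp
                  rw [hp] at h1
                  rw [h1] at h2
                  exact (Option.some_inj.mp h2).symm
                have hdm : List.drop m r = r[m] :: List.drop (m + 1) r :=
                  List.drop_eq_getElem_cons hmlt
                have hpre' : [' '] <+: List.drop (m + 1) r := by
                  rw [← hfc]; exact hpre
                obtain ⟨r3, hr3⟩ := hpre'
                apply h
                apply pv_prefix_drop_infix (n := m + 1)
                show [',', ' '] <+: (ch :: r).drop (m + 1)
                rw [List.drop_succ_cons, hdm, hlast, ← hr3]
                exact ⟨r3, rfl⟩
            · rw [← hTl, ← pv_splitOn_tail [' '] (by decide) r hin] at hmem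
              have hdl : (List.drop ((PySem.Chars.find r [' ']).toNat + [' '].length) r).length ≤ n := by
                simp at hl ⊢; omega
              exact ih _ hdl (fun hr => h (hrinf _ (hr.trans (List.drop_suffix _ r).isInfix))) w hmem
  exact fun c h => key c.length c le_rfl h


-- ===== VERDICT (by name: the statement is the Claim_ definition above) =====
theorem parse_bag_rule_spec : Claim_equal_parse_bag_rule := by
  intro br _hdom hpre
  show parse_bag_rule br = parse_bag_rule_alt br
  have h8 : ("contain ".toList : List Char) ≠ [] := by decide
  have hname : PySem.Chars.join [' ']
      (PySem.List.slice (PySem.Chars.splitOn (PySem.List.pyGetD (PySem.Chars.splitOn br.toList ("contain ".toList)) 0 []) [' ']) (some 0) (some 2)) =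
    PySem.Chars.join [' ']
      (PySem.List.slice (PySem.Chars.splitOn (if 0 ≤ PySem.Chars.find br.toList ("contain ".toList) then PySem.List.slice br.toList none (some (PySem.Chars.find br.toList ("contain ".toList))) else br.toList) [' ']) none (some 2)) := by
    rw [pv_head_eq br.toList _ h8, pv_slice_zero]
  simp only [parse_bag_rule, parse_bag_rule_alt]
  by_cases hno : PySem.Chars.isIn ("no other".toList) br.toList = true
  · rw [if_pos hno, if_pos hno, hname]
  · rw [if_neg hno, if_neg hno]
    rcases hpre with hyes | ⟨hf, hu, _hints⟩
    · exact absurd hyes hno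
    have hu' : ¬ ("contain ".toList) <:+: br.toList.drop ((PySem.Chars.find br.toList ("contain ".toList)).toNat + 8) :=
      (PySem.Chars.isIn_eq_false_iff _ _).mp hu
    have hlen8 : ("contain ".toList : List Char).length = 8 := by decide
    have htailA : PySem.List.pyGetD (PySem.Chars.splitOn br.toList ("contain ".toList)) (-1) [] =
        br.toList.drop ((PySem.Chars.find br.toList ("contain ".toList)).toNat + 8) := by
      have hx := pv_tail_eq_unique br.toList ("contain ".toList) h8 hf (by rw [hlen8]; exact hu')
      rw [hlen8] at hx
      exact hx
    have htailB : (if 0 ≤ PySem.Chars.find br.toList ("contain ".toList) then PySem.List.slice br.toList (some (PySem.Chars.find br.toList ("contain ".toList) + 8)) none else []) =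
        br.toList.drop ((PySem.Chars.find br.toList ("contain ".toList)).toNat + 8) := by
      rw [if_pos hf, PySem.List.slice_from br.toList (by omega)]
      congr 1
      omega
    rw [hname, htailA, htailB]
    have hsep2 : (", ".toList : List Char) = [',', ' '] := by decide
    rw [hsep2]
    set tl := br.toList.drop ((PySem.Chars.find br.toList ("contain ".toList)).toNat + 8) with htl
    have hbody : (fun (d : PySem.Dict String Int) (bagc : List Char) =>
        d.insert (String.ofList (PySem.Chars.join [' '] (PySem.List.slice (PySem.Chars.splitOn bagc [' ']) (some 1) (some (-1)))))
          ((PySem.Int.ofChars? (PySem.List.pyGetD (PySem.Chars.splitOn bagc [' ']) 0 [])).getD 0)) =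
        (fun (d : PySem.Dict String Int) (c : List Char) => pvFlushChunk d (PySem.Chars.splitOn c [' '])) := by
      funext d c
      rw [pv_slice_one_neg_one, pv_pyGetD_zero, pv_headD_of_ne _ _ (pv_splitOn_ne [' '] c)]
      rfl
    rw [hbody, PySem.List.slice_to_neg_one, pv_pyGetD_neg_one, pv_glue_splitOn tl]
    rw [pv_scan (PySem.Chars.splitOn tl [',', ' ']) (pv_splitOn_ne [',', ' '] tl)
      (fun c hc => pv_clean c (pv_chunks_no_sep tl c hc)) PySem.Dict.empty]
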